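-- pv_equiv track=rewrite | github.com/victorbouissoumota/EP2---mota-e-sheik | funcoes.py | calcula_pontos_regra_simples
-- ===== SOURCE A (Python) =====
-- def calcula_pontos_regra_simples (faces):
--     pontos = {}
--     for categoria in range(1,7):
--         soma = 0
--         for dado in faces:
--             if dado == categoria:
--                 soma = soma + dado
--         pontos [categoria] = soma
--     return pontos
-- ===== SOURCE B (Python) =====
-- def calcula_pontos_regra_simples(faces):
--     pontos = {c: 0 for c in range(1, 7)}
--     for dado in faces:
--         if dado in pontos:
--             pontos[dado] += dado
--     return pontos
-- ===== Notes on version B (the rewrite author's own statement) =====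
-- stated objective: simpler
-- what changed: Replaces the nested loop (six scans of faces, one per category) with a pre-seeded zero table and a single pass over faces that accumulates each matching face into its own bucket.
import Mathlib
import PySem

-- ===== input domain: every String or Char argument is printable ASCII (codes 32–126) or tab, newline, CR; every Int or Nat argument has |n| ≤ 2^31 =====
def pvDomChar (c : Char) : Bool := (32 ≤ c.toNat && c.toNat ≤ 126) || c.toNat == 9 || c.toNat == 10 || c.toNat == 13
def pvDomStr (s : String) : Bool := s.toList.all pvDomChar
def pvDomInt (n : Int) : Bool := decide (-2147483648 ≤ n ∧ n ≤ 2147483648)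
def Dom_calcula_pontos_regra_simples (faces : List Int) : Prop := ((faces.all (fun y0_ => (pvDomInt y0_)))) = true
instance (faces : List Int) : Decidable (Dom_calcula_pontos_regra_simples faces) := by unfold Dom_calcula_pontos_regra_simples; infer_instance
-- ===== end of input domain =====

-- B replaces A's six scans of `faces` (one per category) with a pre-seeded zero table and one accumulating pass; same return value.

-- ===== PORT A =====
def calcula_pontos_regra_simples (faces : List Int) : List (Int × Int) :=
  ((PySem.List.pyRange 1 7 1).foldl (fun pontos categoria =>
      pontos.insert categoria
        (faces.foldl (fun soma dado => if dado == categoria then soma + dado else soma) 0))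
    PySem.Dict.empty).items

-- ===== PORT B =====
def calcula_pontos_regra_simples_alt (faces : List Int) : List (Int × Int) :=
  let init : PySem.Dict Int Int :=
    (PySem.List.pyRange 1 7 1).foldl (fun d c => d.insert c 0) PySem.Dict.empty
  (faces.foldl (fun pontos dado =>
      if pontos.contains dado then pontos.modify dado 0 (fun v => v + dado) else pontos) init).items

-- ===== PRECONDITION & SPEC =====
def Spec_calcula_pontos_regra_simples (faces : List Int) (out : List (Int × Int)) : Prop := out = calcula_pontos_regra_simples_alt faces
instance (faces : List Int) (out : List (Int × Int)) : Decidable (Spec_calcula_pontos_regra_simples faces out) := by unfold Spec_calcula_pontos_regra_simples; infer_instance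

-- ===== CLAIM (what is proved, stated in full; the proofs are below) =====
def Claim_equal_calcula_pontos_regra_simples : Prop := ∀ (faces : List Int), Dom_calcula_pontos_regra_simples faces → Spec_calcula_pontos_regra_simples faces (calcula_pontos_regra_simples faces)

-- ===== LEMMAS AND PROOFS =====

/-- A's inner sum for one category. -/
def catSum (faces : List Int) (c : Int) : Int :=
  faces.foldl (fun soma dado => if dado == c then soma + dado else soma) 0

lemma catSum_shift (l : List Int) (c s : Int) :
    l.foldl (fun soma dado => if dado == c then soma + dado else soma) s = s + catSum l c := by
  have hf : (fun soma dado => if dado == c then soma + dado else soma)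
      = (fun (soma : Int) (dado : Int) => soma + (if dado == c then dado else 0)) := by
    funext s d; split_ifs <;> simp
  rw [catSum, hf, PySem.List.foldl_add, PySem.List.foldl_add]
  ring

lemma catSum_cons (d : Int) (rest : List Int) (c : Int) :
    catSum (d :: rest) c = (if d = c then d else 0) + catSum rest c := by
  simp only [catSum, List.foldl_cons]
  rw [catSum_shift]
  by_cases h : d = c <;> simp [h, catSum]

lemma portA_eq (faces : List Int) :
    calcula_pontos_regra_simples faces =
      [(1, catSum faces 1), (2, catSum faces 2), (3, catSum faces 3),
       (4, catSum faces 4), (5, catSum faces 5), (6, catSum faces 6)] := rfl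

set_option maxRecDepth 4000 in
lemma portB_fold (faces : List Int) (a1 a2 a3 a4 a5 a6 : Int) :
    (faces.foldl (fun pontos dado =>
        if pontos.contains dado then pontos.modify dado 0 (fun v => v + dado) else pontos)
      (PySem.Dict.mk [(1, a1), (2, a2), (3, a3), (4, a4), (5, a5), (6, a6)])).items
    = [(1, a1 + catSum faces 1), (2, a2 + catSum faces 2), (3, a3 + catSum faces 3),
       (4, a4 + catSum faces 4), (5, a5 + catSum faces 5), (6, a6 + catSum faces 6)] := by
  induction faces generalizing a1 a2 a3 a4 a5 a6 with
  | nil => simp [catSum]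
  | cons d rest ih =>
      simp only [List.foldl_cons]
      by_cases h1 : d = 1
      · subst h1
        rw [show (if (PySem.Dict.mk [((1:Int), a1), (2, a2), (3, a3), (4, a4), (5, a5), (6, a6)] : PySem.Dict Int Int).contains 1 then (PySem.Dict.mk [((1:Int), a1), (2, a2), (3, a3), (4, a4), (5, a5), (6, a6)] : PySem.Dict Int Int).modify 1 0 (fun v => v + 1) else PySem.Dict.mk [(1, a1), (2, a2), (3, a3), (4, a4), (5, a5), (6, a6)]) = PySem.Dict.mk [(1, a1 + 1), (2, a2), (3, a3), (4, a4), (5, a5), (6, a6)] from by simp [PySem.Dict.contains, PySem.Dict.modify, PySem.Dict.getD, PySem.Dict.get?, PySem.Dict.insert], ih]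
        simp [catSum_cons, add_assoc]
      by_cases h2 : d = 2
      · subst h2
        rw [show (if (PySem.Dict.mk [((1:Int), a1), (2, a2), (3, a3), (4, a4), (5, a5), (6, a6)] : PySem.Dict Int Int).contains 2 then (PySem.Dict.mk [((1:Int), a1), (2, a2), (3, a3), (4, a4), (5, a5), (6, a6)] : PySem.Dict Int Int).modify 2 0 (fun v => v + 2) else PySem.Dict.mk [(1, a1), (2, a2), (3, a3), (4, a4), (5, a5), (6, a6)]) = PySem.Dict.mk [(1, a1), (2, a2 + 2), (3, a3), (4, a4), (5, a5), (6, a6)] from by simp [PySem.Dict.contains, PySem.Dict.modify, PySem.Dict.getD, PySem.Dict.get?, PySem.Dict.insert], ih]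
        simp [catSum_cons, add_assoc]
      by_cases h3 : d = 3
      · subst h3
        rw [show (if (PySem.Dict.mk [((1:Int), a1), (2, a2), (3, a3), (4, a4), (5, a5), (6, a6)] : PySem.Dict Int Int).contains 3 then (PySem.Dict.mk [((1:Int), a1), (2, a2), (3, a3), (4, a4), (5, a5), (6, a6)] : PySem.Dict Int Int).modify 3 0 (fun v => v + 3) else PySem.Dict.mk [(1, a1), (2, a2), (3, a3), (4, a4), (5, a5), (6, a6)]) = PySem.Dict.mk [(1, a1), (2, a2), (3, a3 + 3), (4, a4), (5, a5), (6, a6)] from by simp [PySem.Dict.contains, PySem.Dict.modify, PySem.Dict.getD, PySem.Dict.get?, PySem.Dict.insert], ih]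
        simp [catSum_cons, add_assoc]
      by_cases h4 : d = 4
      · subst h4
        rw [show (if (PySem.Dict.mk [((1:Int), a1), (2, a2), (3, a3), (4, a4), (5, a5), (6, a6)] : PySem.Dict Int Int).contains 4 then (PySem.Dict.mk [((1:Int), a1), (2, a2), (3, a3), (4, a4), (5, a5), (6, a6)] : PySem.Dict Int Int).modify 4 0 (fun v => v + 4) else PySem.Dict.mk [(1, a1), (2, a2), (3, a3), (4, a4), (5, a5), (6, a6)]) = PySem.Dict.mk [(1, a1), (2, a2), (3, a3), (4, a4 + 4), (5, a5), (6, a6)] from by simp [PySem.Dict.contains, PySem.Dict.modify, PySem.Dict.getD, PySem.Dict.get?, PySem.Dict.insert], ih]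
        simp [catSum_cons, add_assoc]
      by_cases h5 : d = 5
      · subst h5
        rw [show (if (PySem.Dict.mk [((1:Int), a1), (2, a2), (3, a3), (4, a4), (5, a5), (6, a6)] : PySem.Dict Int Int).contains 5 then (PySem.Dict.mk [((1:Int), a1), (2, a2), (3, a3), (4, a4), (5, a5), (6, a6)] : PySem.Dict Int Int).modify 5 0 (fun v => v + 5) else PySem.Dict.mk [(1, a1), (2, a2), (3, a3), (4, a4), (5, a5), (6, a6)]) = PySem.Dict.mk [(1, a1), (2, a2), (3, a3), (4, a4), (5, a5 + 5), (6, a6)] from by simp [PySem.Dict.contains, PySem.Dict.modify, PySem.Dict.getD, PySem.Dict.get?, PySem.Dict.insert], ih]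
        simp [catSum_cons, add_assoc]
      by_cases h6 : d = 6
      · subst h6
        rw [show (if (PySem.Dict.mk [((1:Int), a1), (2, a2), (3, a3), (4, a4), (5, a5), (6, a6)] : PySem.Dict Int Int).contains 6 then (PySem.Dict.mk [((1:Int), a1), (2, a2), (3, a3), (4, a4), (5, a5), (6, a6)] : PySem.Dict Int Int).modify 6 0 (fun v => v + 6) else PySem.Dict.mk [(1, a1), (2, a2), (3, a3), (4, a4), (5, a5), (6, a6)]) = PySem.Dict.mk [(1, a1), (2, a2), (3, a3), (4, a4), (5, a5), (6, a6 + 6)] from by simp [PySem.Dict.contains, PySem.Dict.modify, PySem.Dict.getD, PySem.Dict.get?, PySem.Dict.insert], ih]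
        simp [catSum_cons, add_assoc]
      · rw [show (if (PySem.Dict.mk [((1:Int), a1), (2, a2), (3, a3), (4, a4), (5, a5), (6, a6)] : PySem.Dict Int Int).contains d then (PySem.Dict.mk [((1:Int), a1), (2, a2), (3, a3), (4, a4), (5, a5), (6, a6)] : PySem.Dict Int Int).modify d 0 (fun v => v + d) else PySem.Dict.mk [(1, a1), (2, a2), (3, a3), (4, a4), (5, a5), (6, a6)]) = PySem.Dict.mk [(1, a1), (2, a2), (3, a3), (4, a4), (5, a5), (6, a6)] from by simp [PySem.Dict.contains, beq_iff_eq, Ne.symm h1, Ne.symm h2, Ne.symm h3, Ne.symm h4, Ne.symm h5, Ne.symm h6], ih]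
        simp [catSum_cons, h1, h2, h3, h4, h5, h6]

theorem calcula_pontos_regra_simples_spec : Claim_equal_calcula_pontos_regra_simples := by
  intro faces _
  show _ = _
  rw [portA_eq, calcula_pontos_regra_simples_alt]
  rw [show ((PySem.List.pyRange 1 7 1).foldl (fun d c => d.insert c 0) PySem.Dict.empty : PySem.Dict Int Int) = PySem.Dict.mk [(1, 0), (2, 0), (3, 0), (4, 0), (5, 0), (6, 0)] from rfl, portB_fold]
  simp
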